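-- pv_equiv track=rewrite | github.com/Abrothguer/UFU | ai/4queens.py | find_better
-- ===== SOURCE A (Python) =====
-- INF = 1000
--
-- def find_better(c_board):
--
--     min_cost = INF
--     for i in range(len(c_board)):
--         for j in range(len(c_board[i])):
--             if c_board[i][j] <= min_cost:
--                 min_cost = c_board[i][j]
--
--     min_coords = []
--     for i in range(len(c_board)):
--         for j in range(len(c_board[i])):
--             if c_board[i][j] == min_cost:
--                 min_coords.append((i,j))
--
--     return min_coords
-- ===== SOURCE B (Python) =====
-- def find_better(c_board):
--     min_cost = 1000
--     min_coords = []
--     for i, row in enumerate(c_board):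
--         for j, v in enumerate(row):
--             if v < min_cost:
--                 min_cost = v
--                 min_coords = [(i, j)]
--             elif v == min_cost:
--                 min_coords.append((i, j))
--     return min_coords
-- ===== Notes on version B (the rewrite author's own statement) =====
-- stated objective: simpler
-- what changed: Replaces A's two full nested scans (one to find the minimum, one to collect its coordinates) with a single row-major pass that tracks the running minimum and resets/extends the coordinate list as it goes.
import Mathlib
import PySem

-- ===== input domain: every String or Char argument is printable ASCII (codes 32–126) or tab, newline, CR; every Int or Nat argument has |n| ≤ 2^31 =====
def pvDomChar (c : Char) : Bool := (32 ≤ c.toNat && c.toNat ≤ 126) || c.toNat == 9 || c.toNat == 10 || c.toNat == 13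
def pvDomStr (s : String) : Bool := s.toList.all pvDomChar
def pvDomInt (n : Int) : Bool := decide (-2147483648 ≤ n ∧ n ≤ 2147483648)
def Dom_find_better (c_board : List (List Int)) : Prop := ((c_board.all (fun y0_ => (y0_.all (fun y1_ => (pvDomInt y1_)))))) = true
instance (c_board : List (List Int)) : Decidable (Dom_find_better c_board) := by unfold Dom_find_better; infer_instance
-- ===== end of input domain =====

-- B makes a single row-major pass tracking the running minimum and its coordinates,
-- instead of A's two full nested scans (find the minimum, then collect its cells).

-- ===== PORT A =====
def find_better (c_board : List (List Int)) : List (Int × Int) :=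
  let min_cost : Int :=
    (PySem.List.pyRange 0 c_board.length 1).foldl (fun m i =>
      (PySem.List.pyRange 0 (PySem.List.pyGetD c_board i []).length 1).foldl (fun m j =>
        if PySem.List.pyGetD (PySem.List.pyGetD c_board i []) j 0 ≤ m
        then PySem.List.pyGetD (PySem.List.pyGetD c_board i []) j 0 else m) m) 1000
  let min_coords : List (Int × Int) :=
    (PySem.List.pyRange 0 c_board.length 1).foldl (fun acc i =>
      (PySem.List.pyRange 0 (PySem.List.pyGetD c_board i []).length 1).foldl (fun acc j =>
        if PySem.List.pyGetD (PySem.List.pyGetD c_board i []) j 0 = min_cost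
        then acc ++ [(i, j)] else acc) acc) []
  min_coords

-- ===== PORT B =====
def find_better_alt (c_board : List (List Int)) : List (Int × Int) :=
  ((PySem.List.enumerate c_board 0).foldl (fun (st : Int × List (Int × Int)) irow =>
    (PySem.List.enumerate irow.2 0).foldl (fun st jv =>
      if jv.2 < st.1 then (jv.2, [(irow.1, jv.1)])
      else if jv.2 = st.1 then (st.1, st.2 ++ [(irow.1, jv.1)])
      else st) st) (1000, [])).2

-- ===== PRECONDITION & SPEC =====
def Spec_find_better (c_board : List (List Int)) (out : List (Int × Int)) : Prop := out = find_better_alt c_board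
instance (c_board : List (List Int)) (out : List (Int × Int)) : Decidable (Spec_find_better c_board out) := by unfold Spec_find_better; infer_instance

-- ===== CLAIM (what is proved, stated in full; the proofs are below) =====
def Claim_equal_find_better : Prop := ∀ (c_board : List (List Int)), Dom_find_better c_board → Spec_find_better c_board (find_better c_board)

-- ===== LEMMAS AND PROOFS =====

-- generic forms over a flat list of (coordinate, value) cells
def pvMinStep (m : Int) (cv : (Int × Int) × Int) : Int := if cv.2 ≤ m then cv.2 else m

def pvBStep (st : Int × List (Int × Int)) (cv : (Int × Int) × Int) : Int × List (Int × Int) :=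
  if cv.2 < st.1 then (cv.2, [cv.1])
  else if cv.2 = st.1 then (st.1, st.2 ++ [cv.1])
  else st

theorem pvMin_le (cells : List ((Int × Int) × Int)) : ∀ m : Int, cells.foldl pvMinStep m ≤ m := by
  induction cells with
  | nil => intro m; simp
  | cons cv rest ih =>
    intro m
    have h := ih (pvMinStep m cv)
    simp only [List.foldl_cons]
    have : pvMinStep m cv ≤ m := by unfold pvMinStep; split <;> omega
    omega

theorem pvLoop (cells : List ((Int × Int) × Int)) :
    ∀ (m0 : Int) (acc0 : List (Int × Int)),
      cells.foldl pvBStep (m0, acc0) =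
        (cells.foldl pvMinStep m0,
         (if cells.foldl pvMinStep m0 = m0 then acc0 else []) ++
           (cells.filter (fun cv => cv.2 = cells.foldl pvMinStep m0)).map Prod.fst) := by
  induction cells with
  | nil => intro m0 acc0; simp
  | cons cv rest ih =>
    intro m0 acc0
    simp only [List.foldl_cons]
    by_cases h1 : cv.2 < m0
    · have hstep : pvBStep (m0, acc0) cv = (cv.2, [cv.1]) := by
        unfold pvBStep; simp [h1]
      have hmin : pvMinStep m0 cv = cv.2 := by unfold pvMinStep; split <;> omega
      rw [hstep]; simp only [hmin]; rw [ih cv.2 [cv.1]]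
      have hle := pvMin_le rest cv.2
      have hne : rest.foldl pvMinStep cv.2 ≠ m0 := by omega
      simp only [hne, List.filter_cons]
      by_cases h2 : cv.2 = rest.foldl pvMinStep cv.2
      · simp [← h2]
      · have : rest.foldl pvMinStep cv.2 ≠ cv.2 := fun h => h2 h.symm
        simp [this, h2]
    · by_cases h2 : cv.2 = m0
      · have hstep : pvBStep (m0, acc0) cv = (m0, acc0 ++ [cv.1]) := by
          unfold pvBStep; simp [h2]
        have hmin : pvMinStep m0 cv = m0 := by unfold pvMinStep; split <;> omega
        rw [hstep]; simp only [hmin]; rw [ih m0 (acc0 ++ [cv.1]), List.filter_cons]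
        by_cases h3 : rest.foldl pvMinStep m0 = m0
        · simp [h3, h2]
        · have : ¬ cv.2 = rest.foldl pvMinStep m0 := by rw [h2]; exact fun h => h3 h.symm
          simp [h3, this]
      · have hstep : pvBStep (m0, acc0) cv = (m0, acc0) := by
          unfold pvBStep; simp [h1, h2]
        have hmin : pvMinStep m0 cv = m0 := by unfold pvMinStep; split <;> omega
        rw [hstep]; simp only [hmin]; rw [ih m0 acc0, List.filter_cons]
        have hle := pvMin_le rest m0
        have : ¬ cv.2 = rest.foldl pvMinStep m0 := by omega
        simp [this]

-- the row-major cell list both ports traverse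
def pvCells (c_board : List (List Int)) : List ((Int × Int) × Int) :=
  (PySem.List.enumerate c_board 0).flatMap (fun irow =>
    (PySem.List.enumerate irow.2 0).map (fun jv => ((irow.1, jv.1), jv.2)))

theorem pvFilterFold (M : Int) (cells : List ((Int × Int) × Int)) :
    ∀ acc : List (Int × Int),
      cells.foldl (fun acc cv => if cv.2 = M then acc ++ [cv.1] else acc) acc =
        acc ++ (cells.filter (fun cv => cv.2 = M)).map Prod.fst := by
  induction cells with
  | nil => intro acc; simp
  | cons cv rest ih =>
    intro acc
    simp only [List.foldl_cons, List.filter_cons]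
    by_cases h : cv.2 = M
    · simp [h, ih]
    · simp [h, ih]

theorem find_better_alt_eq (c_board : List (List Int)) :
    find_better_alt c_board = ((pvCells c_board).foldl pvBStep (1000, [])).2 := by
  unfold find_better_alt pvCells
  rw [List.foldl_flatMap]
  have hfun : (fun (st : Int × List (Int × Int)) (irow : Int × List Int) =>
      (PySem.List.enumerate irow.2 0).foldl (fun st jv =>
        if jv.2 < st.1 then (jv.2, [(irow.1, jv.1)])
        else if jv.2 = st.1 then (st.1, st.2 ++ [(irow.1, jv.1)])
        else st) st)
    = (fun acc x => List.foldl pvBStep acc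
        (List.map (fun jv => ((x.1, jv.1), jv.2)) (PySem.List.enumerate x.2 0))) := by
    funext st irow
    rw [List.foldl_map]
    rfl
  rw [hfun]

theorem pass_eq_cells_fold {β : Type} (c_board : List (List Int))
    (g : β → (Int × Int) × Int → β) (init : β) :
    (PySem.List.pyRange 0 c_board.length 1).foldl (fun acc i =>
      (PySem.List.pyRange 0 (PySem.List.pyGetD c_board i []).length 1).foldl (fun acc j =>
        g acc ((i, j), PySem.List.pyGetD (PySem.List.pyGetD c_board i []) j 0)) acc) init =
    (pvCells c_board).foldl g init := by
  unfold pvCells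
  rw [List.foldl_flatMap]
  rw [PySem.List.enumerate_eq_map_pyRange c_board []]
  rw [List.foldl_map]
  have hfun : (fun (acc : β) (i : Int) =>
      (PySem.List.pyRange 0 (PySem.List.pyGetD c_board i []).length 1).foldl (fun acc j =>
        g acc ((i, j), PySem.List.pyGetD (PySem.List.pyGetD c_board i []) j 0)) acc)
    = (fun acc x => List.foldl g acc
        (List.map (fun jv => ((x, jv.1), jv.2))
          (PySem.List.enumerate (PySem.List.pyGetD c_board x []) 0))) := by
    funext acc i
    rw [List.foldl_map]
    rw [PySem.List.enumerate_eq_map_pyRange (PySem.List.pyGetD c_board i []) 0]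
    rw [List.foldl_map]
    rfl
  rw [← hfun]
  rfl

theorem find_better_eq (c_board : List (List Int)) :
    find_better c_board =
      ((pvCells c_board).filter
        (fun cv => cv.2 = (pvCells c_board).foldl pvMinStep 1000)).map Prod.fst := by
  show (PySem.List.pyRange 0 c_board.length 1).foldl (fun acc i =>
      (PySem.List.pyRange 0 (PySem.List.pyGetD c_board i []).length 1).foldl (fun acc j =>
        if PySem.List.pyGetD (PySem.List.pyGetD c_board i []) j 0 =
          (PySem.List.pyRange 0 c_board.length 1).foldl (fun m i =>
            (PySem.List.pyRange 0 (PySem.List.pyGetD c_board i []).length 1).foldl (fun m j =>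
              if PySem.List.pyGetD (PySem.List.pyGetD c_board i []) j 0 ≤ m
              then PySem.List.pyGetD (PySem.List.pyGetD c_board i []) j 0 else m) m) 1000
        then acc ++ [(i, j)] else acc) acc) [] = _
  rw [pass_eq_cells_fold c_board (fun m cv => if cv.2 ≤ m then cv.2 else m) 1000]
  have hmin : (pvCells c_board).foldl (fun m cv => if cv.2 ≤ m then cv.2 else m) 1000
       = (pvCells c_board).foldl pvMinStep 1000 := rfl
  rw [hmin]
  rw [pass_eq_cells_fold c_board
    (fun acc cv => if cv.2 = (pvCells c_board).foldl pvMinStep 1000 then acc ++ [cv.1] else acc) []]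
  rw [pvFilterFold]
  simp

-- ===== VERDICT (by name: the statement is the Claim_ definition above) =====
theorem find_better_spec : Claim_equal_find_better := by
  intro c_board _
  unfold Spec_find_better
  rw [find_better_eq, find_better_alt_eq, pvLoop]
  simp
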